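-- pv_equiv track=rewrite | github.com/LucyLu717/Advent-of-Code | 2019/day4/day4.py | has_exact_double
-- ===== SOURCE A (Python) =====
-- def has_exact_double(digits):
--     count_map = dict()
--     for i in range(0, len(digits) - 1):
--         count_map[digits[i]] = count_map.get(digits[i]) if digits[i] in count_map else 1
--         if digits[i] == digits[i + 1]:
--             count_map[digits[i]] += 1
--     for i in count_map.keys():
--         if count_map.get(i) == 2:
--             return True
--     return False
-- ===== SOURCE B (Python) =====
-- def has_exact_double(digits):
--     totals = {}
--     i, n = 0, len(digits)
--     while i < n:
--         j = i + 1
--         while j < n and digits[j] == digits[i]: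
--             j += 1
--         totals[digits[i]] = totals.get(digits[i], 0) + (j - i - 1)
--         i = j
--     return any(v == 1 for v in totals.values())
-- ===== Notes on version B (the rewrite author's own statement) =====
-- stated objective: alternative
-- what changed: Replaces A's per-index dict of 1+pair-counts (built with a conditional reinsert at every position and a final '== 2' key scan) by a run-length scan that peels maximal runs of equal digits, pools run_length-1 adjacent pairs per digit in a dict, and tests whether any pooled pair count is exactly 1.
import Mathlib
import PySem

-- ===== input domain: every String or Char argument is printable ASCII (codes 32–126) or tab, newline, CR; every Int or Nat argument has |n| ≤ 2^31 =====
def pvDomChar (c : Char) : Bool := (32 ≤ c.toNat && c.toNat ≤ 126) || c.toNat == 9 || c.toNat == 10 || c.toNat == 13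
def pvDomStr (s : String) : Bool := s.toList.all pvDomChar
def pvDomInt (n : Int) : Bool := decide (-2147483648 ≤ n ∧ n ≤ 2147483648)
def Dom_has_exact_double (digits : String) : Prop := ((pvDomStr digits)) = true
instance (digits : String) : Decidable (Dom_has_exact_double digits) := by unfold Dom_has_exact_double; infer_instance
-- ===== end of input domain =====

-- B replaces A's per-index dict bookkeeping by a run-length scan that pools adjacent-pair
-- counts per digit and tests for a pooled pair count of exactly 1 (objective: alternative).

-- ===== PORT A =====
def has_exact_double (digits : String) : Bool :=
  let ds := digits.toList
  let count_map := (PySem.List.pyRange 0 ((ds.length : Int) - 1) 1).foldl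
    (fun (cm : PySem.Dict Char Int) i =>
      let c := PySem.List.pyGetD ds i ' '
      let cm := if cm.contains c then cm.insert c (cm.getD c 0) else cm.insert c 1
      if c = PySem.List.pyGetD ds (i + 1) ' ' then cm.insert c (cm.getD c 0 + 1) else cm)
    PySem.Dict.empty
  count_map.keys.any (fun k => count_map.getD k 0 == 2)

-- ===== PORT B =====
-- port of Source B's outer while loop: peel one maximal run per step
def altRuns (totals : PySem.Dict Char Int) : List Char → PySem.Dict Char Int
  | [] => totals
  | c :: rest =>
    altRuns (totals.insert c (totals.getD c 0 + ((rest.takeWhile (fun x => x == c)).length : Int)))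
            (rest.dropWhile (fun x => x == c))
  termination_by l => l.length
  decreasing_by
    have := List.length_dropWhile_le (fun x => x == c) rest
    simp only [List.length_cons]
    omega

def has_exact_double_alt (digits : String) : Bool :=
  (altRuns PySem.Dict.empty digits.toList).values.any (fun v => v == 1)

-- ===== PRECONDITION & SPEC =====
def Spec_has_exact_double (digits : String) (out : Bool) : Prop := out = has_exact_double_alt digits
instance (digits : String) (out : Bool) : Decidable (Spec_has_exact_double digits out) := by unfold Spec_has_exact_double; infer_instance

-- ===== CLAIM (what is proved, stated in full; the proofs are below) =====
def Claim_equal_has_exact_double : Prop := ∀ (digits : String), Dom_has_exact_double digits → Spec_has_exact_double digits (has_exact_double digits)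

-- ===== LEMMAS AND PROOFS =====

-- adjacent equal-pair count of character c in a list
def cnt (c : Char) : List Char → Nat
  | a :: b :: t => (if a = c ∧ b = c then 1 else 0) + cnt c (b :: t)
  | _ => 0

-- pair-list version (for A's fold over index pairs)
def cntP (c : Char) (ps : List (Char × Char)) : Nat :=
  ps.countP (fun p => p.1 == c && p.2 == c)

def stepA (cm : PySem.Dict Char Int) (p : Char × Char) : PySem.Dict Char Int :=
  let cm' := if cm.contains p.1 then cm.insert p.1 (cm.getD p.1 0) else cm.insert p.1 1
  if p.1 = p.2 then cm'.insert p.1 (cm'.getD p.1 0 + 1) else cm'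

theorem cntP_zip (c : Char) : ∀ l : List Char, cntP c (l.zip l.tail) = cnt c l
  | [] => by simp [cntP, cnt]
  | [a] => by simp [cntP, cnt]
  | a :: b :: t => by
    have ih := cntP_zip c (b :: t)
    simp only [List.tail_cons, List.zip_cons_cons, cntP, List.countP_cons, cnt] at *
    simp only [beq_iff_eq, Bool.and_eq_true, decide_eq_true_eq]
    split_ifs with h <;> simp_all <;> omega

theorem stepA_contains (cm : PySem.Dict Char Int) (p : Char × Char) (c : Char) :
    (stepA cm p).contains c = (cm.contains c || (c == p.1)) := by
  unfold stepA
  split_ifs <;> simp [PySem.Dict.contains_insert] <;> rw [Bool.or_comm]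

theorem stepA_getD (cm : PySem.Dict Char Int) (p : Char × Char) (c : Char) :
    (stepA cm p).getD c 0 =
      if c = p.1 then (if cm.contains c then cm.getD c 0 else 1) + (if p.1 = p.2 then 1 else 0)
      else cm.getD c 0 := by
  unfold stepA
  by_cases hc : c = p.1
  · subst hc
    split_ifs <;> (try simp [PySem.Dict.getD_insert_self]) <;> simp_all
  · split_ifs <;> simp [PySem.Dict.getD_insert, hc]

theorem A_pairs (ds : List Char) :
    (PySem.List.pyRange 0 ((ds.length : Int) - 1) 1).foldl
      (fun (cm : PySem.Dict Char Int) i =>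
        let c := PySem.List.pyGetD ds i ' '
        let cm := if cm.contains c then cm.insert c (cm.getD c 0) else cm.insert c 1
        if c = PySem.List.pyGetD ds (i + 1) ' ' then cm.insert c (cm.getD c 0 + 1) else cm)
      PySem.Dict.empty
    = (ds.zip ds.tail).foldl stepA PySem.Dict.empty := by
  have hmap : (PySem.List.pyRange 0 ((ds.length : Int) - 1) 1).map
      (fun i => (PySem.List.pyGetD ds i ' ', PySem.List.pyGetD ds (i + 1) ' '))
      = ds.zip ds.tail := by
    apply List.ext_getElem
    · simp [PySem.List.length_pyRange_one, List.length_zip]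
    · intro k hk1 hk2
      simp only [List.getElem_map, PySem.List.getElem_pyRange_one]
      have hlen : k + 1 < ds.length := by
        simp [PySem.List.length_pyRange_one] at hk1
        omega
      have h0 : (0 : Int) + (k : Int) = ((k : Nat) : Int) := by push_cast; ring
      rw [h0]
      have h1 : ((k : Nat) : Int) + 1 = (((k + 1 : Nat)) : Int) := by push_cast; ring
      rw [h1, PySem.List.pyGetD_natCast, PySem.List.pyGetD_natCast]
      rw [List.getElem_zip]
      simp [List.getElem_tail, List.getD_eq_getElem?_getD, List.getElem?_eq_getElem, hlen,
        Nat.lt_of_succ_lt hlen]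
  rw [← hmap, List.foldl_map]
  rfl

theorem A_contains (ps : List (Char × Char)) (cm : PySem.Dict Char Int) (c : Char) :
    (ps.foldl stepA cm).contains c = (cm.contains c || (ps.map Prod.fst).contains c) := by
  induction ps generalizing cm with
  | nil => simp
  | cons p ps ih =>
    rw [List.foldl_cons, ih, stepA_contains]
    simp only [List.map_cons, List.contains_cons, Bool.or_assoc]

theorem A_getD (ps : List (Char × Char)) (cm : PySem.Dict Char Int) (c : Char) :
    (ps.foldl stepA cm).getD c 0 =
      (if cm.contains c then cm.getD c 0 else if (ps.map Prod.fst).contains c then 1 else 0)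
        + (cntP c ps : Int) := by
  induction ps generalizing cm with
  | nil =>
    simp [cntP]
    intro h
    rw [PySem.Dict.getD_of_not_contains]
    exact h
  | cons p ps ih =>
    rw [List.foldl_cons, ih, stepA_contains, stepA_getD]
    have hcnt : (cntP c (p :: ps) : Int) =
        (if c = p.1 then (if p.1 = p.2 then 1 else 0) else 0) + cntP c ps := by
      simp only [cntP, List.countP_cons]
      by_cases hc : c = p.1
      · subst hc
        by_cases hpp : p.1 = p.2
        · have hb : (p.1 == p.1 && p.2 == p.1) = true := by simp [hpp.symm]
          simp [hb, hpp]
          push_cast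
          ring
        · have h2 : (p.2 == p.1) = false := by
            simp only [beq_eq_false_iff_ne, ne_eq]
            exact fun h => hpp h.symm
          simp [hpp, h2]
      · have h1 : (p.1 == c) = false := by
          simp only [beq_eq_false_iff_ne, ne_eq]
          exact fun h => hc h.symm
        simp [hc, h1]
    rw [hcnt]
    clear ih hcnt
    split_ifs <;> simp_all [List.contains_cons] <;> ring

theorem cnt_run (c d : Char) : ∀ rest : List Char,
    cnt d (c :: rest) =
      (if d = c then (rest.takeWhile (fun x => x == c)).length else 0)
        + cnt d (rest.dropWhile (fun x => x == c))
  | [] => by simp [cnt]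
  | b :: t => by
    by_cases hbc : b = c
    · subst hbc
      have ih := cnt_run b d t
      simp only [cnt, List.takeWhile_cons, List.dropWhile_cons, beq_self_eq_true, if_true,
        List.length_cons, and_self] at ih ⊢
      rw [ih]
      by_cases hdb : d = b
      · subst hdb; simp; omega
      · have hbd : ¬ (b = d) := fun h => hdb h.symm
        simp [hdb, hbd]
    · have h1 : (b == c) = false := by simpa using hbc
      have h2 : ¬ (c = d ∧ b = d) := fun ⟨ha, hb⟩ => hbc (hb.trans ha.symm)
      simp [cnt, List.takeWhile_cons, List.dropWhile_cons, h1, h2]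

theorem B_getD (totals : PySem.Dict Char Int) (l : List Char) (d : Char) :
    (altRuns totals l).getD d 0 = totals.getD d 0 + (cnt d l : Int) := by
  induction totals, l using altRuns.induct with
  | case1 totals => simp [altRuns, cnt]
  | case2 totals c rest ih =>
    rw [altRuns, ih, PySem.Dict.getD_insert, cnt_run c d rest]
    by_cases hdc : d = c
    · subst hdc; simp; push_cast; ring
    · simp [hdc]

theorem B_keys (totals : PySem.Dict Char Int) (l : List Char) (d : Char) :
    d ∈ (altRuns totals l).keys ↔ d ∈ totals.keys ∨ d ∈ l := by
  induction totals, l using altRuns.induct with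
  | case1 totals => simp [altRuns]
  | case2 totals c rest ih =>
    have hmem : d ∈ (c :: rest) ↔ d = c ∨ d ∈ rest.dropWhile (fun x => x == c) := by
      constructor
      · intro h
        rcases List.mem_cons.1 h with rfl | h2
        · exact Or.inl rfl
        · conv at h2 => rw [← List.takeWhile_append_dropWhile (p := fun x => x == c) (l := rest)]
          rcases List.mem_append.1 h2 with h3 | h3
          · exact Or.inl (by simpa using List.mem_takeWhile_imp h3)
          · exact Or.inr h3
      · rintro (rfl | h)
        · exact List.mem_cons_self
        · exact List.mem_cons_of_mem _ ((List.dropWhile_sublist _).subset h)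
    rw [altRuns, ih, PySem.Dict.mem_keys_insert, hmem]
    tauto

theorem B_nodup (totals : PySem.Dict Char Int) (l : List Char)
    (h : totals.keys.Nodup) : (altRuns totals l).keys.Nodup := by
  induction totals, l using altRuns.induct with
  | case1 totals => simpa [altRuns] using h
  | case2 totals c rest ih =>
    rw [altRuns]; exact ih (PySem.Dict.nodup_keys_insert _ _ _ h)

theorem cnt_pos_mem (c : Char) : ∀ l : List Char, cnt c l ≠ 0 → c ∈ l
  | a :: b :: t, h => by
    by_cases hab : a = c ∧ b = c
    · exact (List.mem_cons).2 (Or.inl hab.1.symm)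
    · have : cnt c (b :: t) ≠ 0 := by simp [cnt, hab] at h; simpa [hab] using h
      exact (List.mem_cons).2 (Or.inr (cnt_pos_mem c (b :: t) this))
  | [], h => by simp [cnt] at h
  | [a], h => by simp [cnt] at h

theorem cntP_pos_first (c : Char) (ps : List (Char × Char)) (h : cntP c ps ≠ 0) :
    c ∈ ps.map Prod.fst := by
  have : 0 < ps.countP (fun p => p.1 == c && p.2 == c) := Nat.pos_of_ne_zero h
  obtain ⟨p, hp, hpred⟩ := List.countP_pos_iff.1 this
  simp only [beq_iff_eq, Bool.and_eq_true] at hpred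
  exact List.mem_map.2 ⟨p, hp, hpred.1⟩

theorem A_iff (digits : String) :
    has_exact_double digits = true ↔ ∃ c, cnt c digits.toList = 1 := by
  unfold has_exact_double
  simp only []
  rw [A_pairs]
  rw [List.any_eq_true]
  constructor
  · rintro ⟨k, hk, hv⟩
    rw [← PySem.Dict.contains_iff_mem_keys] at hk
    rw [A_contains, PySem.Dict.contains_empty, Bool.false_or] at hk
    rw [A_getD, PySem.Dict.contains_empty] at hv
    simp only [if_false, Bool.false_eq_true, hk, if_true, beq_iff_eq] at hv
    refine ⟨k, ?_⟩
    have : (cntP k (digits.toList.zip digits.toList.tail) : Int) = 1 := by omega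
    have h2 : cntP k (digits.toList.zip digits.toList.tail) = 1 := by exact_mod_cast this
    rw [← cntP_zip]
    exact h2
  · rintro ⟨c, hc⟩
    have h1 : cntP c (digits.toList.zip digits.toList.tail) = 1 := by rw [cntP_zip]; exact hc
    have hmem : c ∈ (digits.toList.zip digits.toList.tail).map Prod.fst :=
      cntP_pos_first c _ (by omega)
    have hcontains : ((digits.toList.zip digits.toList.tail).map Prod.fst).contains c = true :=
      List.elem_iff.2 hmem
    refine ⟨c, ?_, ?_⟩
    · rw [← PySem.Dict.contains_iff_mem_keys, A_contains, PySem.Dict.contains_empty,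
        Bool.false_or]
      exact hcontains
    · rw [A_getD, PySem.Dict.contains_empty]
      have hex : ∃ x, (c, x) ∈ digits.toList.zip digits.toList.tail := by
        obtain ⟨p, hp, he⟩ := List.mem_map.1 hmem
        exact ⟨p.2, by rw [← he]; simpa using hp⟩
      simp [hex, h1]

theorem B_iff (digits : String) :
    has_exact_double_alt digits = true ↔ ∃ c, cnt c digits.toList = 1 := by
  unfold has_exact_double_alt
  have hnd : (altRuns PySem.Dict.empty digits.toList).keys.Nodup :=
    B_nodup _ _ (by simp [PySem.Dict.keys_empty])
  rw [PySem.Dict.values_eq_map_keys _ hnd 0, List.any_map, List.any_eq_true]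
  constructor
  · rintro ⟨k, hk, hv⟩
    rw [B_keys] at hk
    simp only [PySem.Dict.keys_empty, List.not_mem_nil, false_or] at hk
    rw [Function.comp_apply, B_getD, PySem.Dict.getD_empty, beq_iff_eq] at hv
    refine ⟨k, ?_⟩
    omega
  · rintro ⟨c, hc⟩
    have hmem : c ∈ digits.toList := cnt_pos_mem c _ (by omega)
    refine ⟨c, ?_, ?_⟩
    · rw [B_keys]; exact Or.inr hmem
    · rw [Function.comp_apply, B_getD, PySem.Dict.getD_empty]
      simp [hc]

-- ===== VERDICT (by name: the statement is the Claim_ definition above) =====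
theorem has_exact_double_spec : Claim_equal_has_exact_double := by
  intro digits _
  unfold Spec_has_exact_double
  have h := (A_iff digits).trans (B_iff digits).symm
  cases hA : has_exact_double digits <;> cases hB : has_exact_double_alt digits <;>
    simp_all
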